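-- pv_equiv track=rewrite | github.com/nroxa92/me_suite | spark_research2.py | score_ign_block
-- ===== SOURCE A (Python) =====
-- from collections import Counter
--
-- def score_ign_block(d, addr):
--     if addr + 144 > len(d): return 0
--     b = list(d[addr:addr+144])
--     nz = [v for v in b if v > 0]
--     if len(nz) < 100: return 0
--     mn, mx = min(nz), max(nz)
--     if mx < 25 or mn < 10 or mx > 120 or mx - mn < 5: return 0
--     cnt = Counter(b)
--     mc_cnt = cnt.most_common(1)[0][1]
--     if mc_cnt > 60: return 0  # uniformno
--     return (mx - mn) * 10 + len(nz)
-- ===== SOURCE B (Python) =====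
-- def score_ign_block(d, addr):
--     if addr + 144 > len(d):
--         return 0
--     s = sorted(d[addr:addr + 144])
--     rest = s
--     while rest and rest[0] <= 0:
--         rest = rest[1:]
--     nzc = len(rest)
--     if nzc < 100:
--         return 0
--     mn, mx = rest[0], s[-1]
--     if mx < 25 or mn < 10 or mx > 120 or mx - mn < 5:
--         return 0
--     peak, run, prev = 0, 0, None
--     for v in s:
--         run = run + 1 if v == prev else 1
--         prev = v
--         if run > peak:
--             peak = run
--     if peak > 60:
--         return 0
--     return (mx - mn) * 10 + nzc
-- ===== Notes on version B (the rewrite author's own statement) =====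
-- stated objective: alternative
-- what changed: Replaces A's Counter/most_common frequency analysis and separate filter/min/max passes by a sort-then-scan algorithm: the window is sorted once, the nonzero count comes from dropping the leading non-positive prefix, min/max are the first positive and the last element, and the peak frequency is the longest run of equal values in the sorted order.
import Mathlib
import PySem

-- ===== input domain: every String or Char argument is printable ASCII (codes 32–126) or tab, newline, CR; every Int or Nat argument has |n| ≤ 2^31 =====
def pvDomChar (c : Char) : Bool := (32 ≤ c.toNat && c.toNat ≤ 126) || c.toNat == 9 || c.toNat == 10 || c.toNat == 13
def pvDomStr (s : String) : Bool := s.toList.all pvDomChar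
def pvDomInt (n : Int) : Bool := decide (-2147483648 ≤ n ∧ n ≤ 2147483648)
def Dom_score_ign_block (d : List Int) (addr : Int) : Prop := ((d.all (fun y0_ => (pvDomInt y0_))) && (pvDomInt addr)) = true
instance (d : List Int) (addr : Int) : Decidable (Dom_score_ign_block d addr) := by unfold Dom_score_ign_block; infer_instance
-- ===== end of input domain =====

-- B replaces A's Counter/most_common frequency analysis and separate filter/min/max passes by
-- sort-then-scan: sort the window once; nonzero count = what is left after dropping the
-- non-positive prefix, min/max = first positive and last element, peak frequency = longest run
-- of equal values in the sorted order (objective: alternative algorithm, same cost).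

-- ===== PORT A =====
def score_ign_block (d : List Int) (addr : Int) : Int :=
  if addr + 144 > (d.length : Int) then 0
  else
    let b := PySem.List.slice d (some addr) (some (addr + 144))
    let nz := b.filter (fun v => 0 < v)
    if (nz.length : Int) < 100 then 0
    else
      match PySem.List.min? nz (fun v => v), PySem.List.max? nz (fun v => v) with
      | some mn, some mx =>
        if mx < 25 || mn < 10 || 120 < mx || mx - mn < 5 then 0
        else
          let cnt := PySem.Dict.counter b
          -- most_common(1)[0][1]: head of the items sorted by count, descending (stable)
          match PySem.List.sorted cnt.items (fun p => p.2) true with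
          | [] => 0          -- unreachable (Python IndexError): nz ≠ [] forces b ≠ []
          | p :: _ => if 60 < p.2 then 0 else (mx - mn) * 10 + (nz.length : Int)
      | _, _ => 0            -- unreachable (Python ValueError on empty min/max): nz ≠ []

-- ===== PORT B =====
-- run-length loop state: (peak, run, prev); 'v == prev' with prev = None is False
def pvRunStep (st : Int × Int × Option Int) (v : Int) : Int × Int × Option Int :=
  let run := if some v == st.2.2 then st.2.1 + 1 else 1
  ((if run > st.1 then run else st.1), run, some v)

def score_ign_block_alt (d : List Int) (addr : Int) : Int :=
  if addr + 144 > (d.length : Int) then 0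
  else
    let s := PySem.List.sorted (PySem.List.slice d (some addr) (some (addr + 144))) (fun x => x) false
    -- while rest and rest[0] <= 0: rest = rest[1:]
    let rest := s.dropWhile (fun v => decide (v ≤ 0))
    if (rest.length : Int) < 100 then 0
    else
      match rest with
      | [] => 0              -- unreachable: rest is nonempty past the length guard
      | mn :: _ =>
        match PySem.List.pyGet? s (-1) with
        | none => 0          -- unreachable: s is nonempty, so s[-1] exists
        | some mx =>
          if mx < 25 || mn < 10 || 120 < mx || mx - mn < 5 then 0
          else
            let st := s.foldl pvRunStep (0, 0, none)
            if 60 < st.1 then 0 else (mx - mn) * 10 + (rest.length : Int)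

-- ===== PRECONDITION & SPEC =====
def Spec_score_ign_block (d : List Int) (addr : Int) (out : Int) : Prop := out = score_ign_block_alt d addr
instance (d : List Int) (addr : Int) (out : Int) : Decidable (Spec_score_ign_block d addr out) := by unfold Spec_score_ign_block; infer_instance

-- ===== CLAIM (what is proved, stated in full; the proofs are below) =====
def Claim_equal_score_ign_block : Prop := ∀ (d : List Int) (addr : Int), Dom_score_ign_block d addr → Spec_score_ign_block d addr (score_ign_block d addr)

-- ===== LEMMAS AND PROOFS =====

-- on a ≤-sorted list, dropping the non-positive prefix IS filtering the positives
theorem pvDropWhile_eq_filter (l : List Int) (h : l.Pairwise (· ≤ ·)) :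
    l.dropWhile (fun v => decide (v ≤ 0)) = l.filter (fun v => decide (0 < v)) := by
  induction l with
  | nil => rfl
  | cons x t ih =>
    rcases List.pairwise_cons.1 h with ⟨hx, ht⟩
    by_cases hx0 : x ≤ 0
    · simp [hx0, not_lt.2 hx0, ih ht]
    · have hpos : 0 < x := lt_of_not_ge hx0
      have hall : ∀ y ∈ t, (0 < y) := fun y hy => lt_of_lt_of_le hpos (hx y hy)
      simp only [List.dropWhile_cons, List.filter_cons]
      simp only [hx0, decide_false, hpos, decide_true, if_pos]
      rw [List.filter_eq_self.2 (fun y hy => decide_eq_true (hall y hy))]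
      simp

-- on a ≤-sorted list every element is ≤ the last one
theorem pvPairwise_le_getLast (l : List Int) (h : l.Pairwise (· ≤ ·)) (p : Int)
    (hp : l.getLast? = some p) : ∀ y ∈ l, y ≤ p := by
  induction l with
  | nil => simp at hp
  | cons x t ih =>
    rcases List.pairwise_cons.1 h with ⟨hx, ht⟩
    cases t with
    | nil =>
      simp at hp; subst hp; intro y hy; simp at hy; omega
    | cons z u =>
      have hp' : (z :: u).getLast? = some p := by
        simpa [List.getLast?_cons_cons] using hp
      intro y hy
      rcases List.mem_cons.1 hy with rfl | hy'
      · exact le_trans (hx z (by simp)) (ih ht hp' z (by simp))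
      · exact ih ht hp' y hy'

-- invariant of the run-length fold over a ≤-sorted list
theorem pvRunFold_invariant (l : List Int) (h : l.Pairwise (· ≤ ·)) :
    (l.foldl pvRunStep (0, 0, none)).2.2 = l.getLast? ∧
    (∀ v : Int, (l.count v : Int) ≤ (l.foldl pvRunStep (0, 0, none)).1) ∧
    (l = [] ∨ ∃ v ∈ l, (l.count v : Int) = (l.foldl pvRunStep (0, 0, none)).1) ∧
    (∀ p : Int, l.getLast? = some p →
      (l.foldl pvRunStep (0, 0, none)).2.1 = (l.count p : Int)) := by
  induction l using List.reverseRecOn with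
  | nil => simp
  | append_singleton l x ih =>
    have hl : l.Pairwise (· ≤ ·) := (List.pairwise_append.1 h).1
    have hle : ∀ y ∈ l, y ≤ x := fun y hy => (List.pairwise_append.1 h).2.2 y hy x (by simp)
    obtain ⟨hprev, hmax, hatt, hrun⟩ := ih hl
    simp only [List.foldl_append, List.foldl_cons, List.foldl_nil]
    set st := l.foldl pvRunStep (0, 0, (none : Option Int)) with hst
    by_cases hnil : l = []
    · have hst0 : st = (0, 0, none) := by rw [hst, hnil]; rfl
      subst hnil
      rw [hst0]
      refine ⟨by simp [pvRunStep], ?_, ?_, ?_⟩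
      · intro v
        by_cases hv : v = x
        · subst hv; simp [pvRunStep]
        · have h1 : List.count v [x] ≤ 1 := by
            simpa using List.count_le_length (a := v) (l := [x])
          simp only [pvRunStep, List.nil_append]
          have h2 : ((1:Int), (1:Int), some x).1 = 1 := rfl
          calc ((List.count v [x] : Int)) ≤ 1 := by exact_mod_cast h1
            _ ≤ _ := by simp
      · exact Or.inr ⟨x, by simp, by simp [pvRunStep]⟩
      · intro q hq
        have hqx : q = x := by
          have := hq
          simp at this
          omega
        subst hqx
        simp [pvRunStep]
    · obtain ⟨p, hp⟩ : ∃ p, l.getLast? = some p := by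
        cases h' : l.getLast? with
        | none => exact absurd (List.getLast?_eq_none_iff.1 h') hnil
        | some p => exact ⟨p, rfl⟩
      have hpl : p ∈ l := List.mem_of_getLast? hp
      have hrunp : st.2.1 = (l.count p : Int) := hrun p hp
      have hprevp : st.2.2 = some p := by rw [hprev, hp]
      have hlastq : (l ++ [x]).getLast? = some x := by simp
      by_cases hxp : x = p
      · -- x equals the previous last value: the run extends
        subst hxp
        have hbeq : (some x == st.2.2) = true := by rw [hprevp]; simp
        have hrun' : (pvRunStep st x).2.1 = (l.count x : Int) + 1 := by
          simp [pvRunStep, hbeq, hrunp]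
        have hcx : ((l ++ [x]).count x : Int) = (l.count x : Int) + 1 := by
          simp [List.count_append]
        have hpeak : (pvRunStep st x).1
            = if st.1 < (l.count x : Int) + 1 then (l.count x : Int) + 1 else st.1 := by
          simp [pvRunStep, hbeq, hrunp]
        refine ⟨by simp [pvRunStep], ?_, ?_, ?_⟩
        · intro v
          rw [hpeak]
          by_cases hv : v = x
          · subst hv
            rw [hcx]
            split <;> omega
          · have : (l ++ [x]).count v = l.count v := by
              simp [List.count_append, Ne.symm hv]
            rw [this]
            have := hmax v
            split <;> omega
        · rw [hpeak]
          by_cases hgt : st.1 < (l.count x : Int) + 1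
          · refine Or.inr ⟨x, by simp, ?_⟩
            rw [hcx]
            simp [hgt]
          · rcases hatt with h' | ⟨v, hv, hcv⟩
            · exact absurd h' hnil
            · have hvx : v ≠ x := by
                intro h'
                subst h'
                omega
              refine Or.inr ⟨v, by simp [hv], ?_⟩
              have : (l ++ [x]).count v = l.count v := by
                simp [List.count_append, Ne.symm hvx]
              rw [this, hcv]
              simp [hgt]
        · intro q hq
          have hqx : q = x := by rw [hlastq] at hq; exact (Option.some_inj.1 hq).symm
          subst hqx
          rw [hrun', hcx]
      · -- a new, strictly larger value: the run restarts at 1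
        have hbeq : (some x == st.2.2) = false := by
          rw [hprevp]; simp [hxp]
        have hxnot : x ∉ l := by
          intro hxl
          exact hxp (le_antisymm (pvPairwise_le_getLast l hl p hp x hxl) (hle p hpl))
        have hcx0 : l.count x = 0 := List.count_eq_zero.2 hxnot
        have hst1 : (1 : Int) ≤ st.1 := by
          rcases hatt with h' | ⟨v, hv, hcv⟩
          · exact absurd h' hnil
          · have : 1 ≤ l.count v := List.one_le_count_iff.2 hv
            omega
        have hrun' : (pvRunStep st x).2.1 = 1 := by simp [pvRunStep, hbeq]
        have hpeak : (pvRunStep st x).1 = st.1 := by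
          simp only [pvRunStep, hbeq]
          simp only [Bool.false_eq_true, if_false]
          split <;> omega
        refine ⟨by simp [pvRunStep], ?_, ?_, ?_⟩
        · intro v
          rw [hpeak]
          by_cases hv : v = x
          · have hc1 : (l ++ [x]).count v = 1 := by
              simp [hv, List.count_append, hcx0]
            rw [hc1]
            exact_mod_cast hst1
          · have : (l ++ [x]).count v = l.count v := by
              simp [List.count_append, Ne.symm hv]
            rw [this]; exact hmax v
        · rcases hatt with h' | ⟨v, hv, hcv⟩
          · exact absurd h' hnil
          · refine Or.inr ⟨v, by simp [hv], ?_⟩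
            have hvx : v ≠ x := fun h' => hxnot (h' ▸ hv)
            rw [hpeak]
            have : (l ++ [x]).count v = l.count v := by
              simp [List.count_append, Ne.symm hvx]
            rw [this]; exact hcv
        · intro q hq
          have hqx : q = x := by rw [hlastq] at hq; exact (Option.some_inj.1 hq).symm
          subst hqx
          rw [hrun']
          simp [List.count_append, hcx0]

-- negative index -1 is the last element
theorem pvPyGet_neg_one (l : List Int) (hne : l ≠ []) :
    PySem.List.pyGet? l (-1) = l.getLast? := by
  simp [PySem.List.pyGet?, PySem.List.pyIdx?]
  have h1 : 1 ≤ l.length := List.length_pos_iff.2 hne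
  rw [if_pos h1]
  simp [List.getLast?_eq_getElem?]

-- the head count of the count-descending sort equals max over the dict's values
theorem pvPeak_eq (cnt : PySem.Dict Int Int) (p : Int × Int) (rest : List (Int × Int))
    (hs : PySem.List.sorted cnt.items (fun q => q.2) true = p :: rest) (peak : Int)
    (hm : PySem.List.max? cnt.values (fun y => y) = some peak) : p.2 = peak := by
  have hge := PySem.List.key_head_sorted_rev_ge (xs := cnt.items) (key := fun q => q.2) hs
  have hmax := PySem.List.max?_isMax (key := fun y => y) hm
  have hmem := PySem.List.max?_mem (key := fun y => y) hm
  have hpmem : p ∈ cnt.items := by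
    have : p ∈ PySem.List.sorted cnt.items (fun q => q.2) true := by rw [hs]; exact List.mem_cons_self
    exact (PySem.List.mem_sorted _ _ _ _).1 this
  have h1 : p.2 ≤ peak := hmax _ (by
    have : cnt.values = cnt.items.map (fun q => q.2) := rfl
    rw [this]; exact List.mem_map_of_mem hpmem)
  have h2 : peak ≤ p.2 := by
    have : cnt.values = cnt.items.map (fun q => q.2) := rfl
    rw [this] at hmem
    obtain ⟨q, hq, hq2⟩ := List.mem_map.1 hmem
    simpa [hq2] using hge q hq
  omega

theorem score_ign_block_eq (d : List Int) (addr : Int) :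
    score_ign_block d addr = score_ign_block_alt d addr := by
  unfold score_ign_block score_ign_block_alt
  by_cases hlen : addr + 144 > (d.length : Int)
  · simp [hlen]
  · simp only [hlen, if_false]
    set b := PySem.List.slice d (some addr) (some (addr + 144)) with hb
    set s := PySem.List.sorted b (fun x => x) false with hseq
    have hperm : s.Perm b := PySem.List.sorted_perm b (fun x => x) false
    have hpw : s.Pairwise (· ≤ ·) := PySem.List.sorted_pairwise b (fun x => x)
    set nz := b.filter (fun v => decide (0 < v)) with hnz
    set rest := s.dropWhile (fun v => decide (v ≤ 0)) with hrestdef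
    have hrest : rest = s.filter (fun v => decide (0 < v)) := pvDropWhile_eq_filter s hpw
    have hpermf : (s.filter (fun v => decide (0 < v))).Perm nz := hperm.filter _
    have hlenf : rest.length = nz.length := by rw [hrest]; exact hpermf.length_eq
    by_cases hc : (nz.length : Int) < 100
    · simp [hc, hlenf]
    · have hc' : ¬ ((rest.length : Int) < 100) := by rw [hlenf]; exact hc
      have hnznil : nz ≠ [] := by intro h'; rw [h'] at hc; simp at hc
      have hrestnil : rest ≠ [] := by
        intro h'; apply hnznil; have := hlenf; rw [h'] at this
        exact List.eq_nil_of_length_eq_zero this.symm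
      have hsnil : s ≠ [] := by
        intro h'; apply hrestnil; rw [hrest, h']; rfl
      have hbnil : b ≠ [] := by
        intro h'; apply hsnil
        have : s.length = b.length := hperm.length_eq
        rw [h'] at this; exact List.eq_nil_of_length_eq_zero this
      obtain ⟨x, t, hxt⟩ := List.exists_cons_of_ne_nil hnznil
      obtain ⟨mn, tl, hmt⟩ := List.exists_cons_of_ne_nil hrestnil
      have hmin : PySem.List.min? nz (fun v => v) = some (t.foldl min x) := by
        rw [hxt]; exact PySem.List.min?_id_cons x t
      have hmax : PySem.List.max? nz (fun v => v) = some (t.foldl max x) := by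
        rw [hxt]; exact PySem.List.max?_id_cons x t
      obtain ⟨mx, hmx⟩ : ∃ mx, s.getLast? = some mx := by
        cases h' : s.getLast? with
        | none => exact absurd (List.getLast?_eq_none_iff.1 h') hsnil
        | some q => exact ⟨q, rfl⟩
      have hget : PySem.List.pyGet? s (-1) = some mx := by
        rw [pvPyGet_neg_one s hsnil, hmx]
      -- membership transfer between rest and nz
      have hmem_rest_nz : ∀ y, y ∈ rest ↔ y ∈ nz := by
        intro y; rw [hrest]
        exact ⟨fun h' => hpermf.mem_iff.1 h', fun h' => hpermf.mem_iff.2 h'⟩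
      -- mn is the minimum of nz
      have hrest_pw : rest.Pairwise (· ≤ ·) := by
        rw [hrest]; exact hpw.filter _
      have hmn_le : ∀ y ∈ nz, mn ≤ y := by
        intro y hy
        have hy' : y ∈ rest := (hmem_rest_nz y).2 hy
        rw [hmt] at hy' hrest_pw
        rcases List.mem_cons.1 hy' with rfl | hy''
        · exact le_refl _
        · exact (List.pairwise_cons.1 hrest_pw).1 y hy''
      have hmn_mem : mn ∈ nz := (hmem_rest_nz mn).1 (by rw [hmt]; exact List.mem_cons_self)
      have hminA_le : ∀ y ∈ nz, t.foldl min x ≤ y := by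
        intro y hy
        rw [hxt] at hy
        rcases List.mem_cons.1 hy with rfl | hy'
        · exact (PySem.List.foldl_min_le t y).1
        · exact (PySem.List.foldl_min_le t x).2 y hy'
      have hminA_mem : t.foldl min x ∈ nz := by
        rw [hxt]
        rcases PySem.List.foldl_min_mem t x with h' | h'
        · rw [h']; exact List.mem_cons_self
        · exact List.mem_cons_of_mem _ h'
      have hmn_eq : mn = t.foldl min x :=
        le_antisymm (hmn_le _ hminA_mem) (hminA_le _ hmn_mem)
      -- mx is the maximum of nz
      have hmx_mem_s : mx ∈ s := List.mem_of_getLast? hmx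
      have hmx_ge : ∀ y ∈ s, y ≤ mx := pvPairwise_le_getLast s hpw mx hmx
      have hmn_pos : (0 : Int) < mn := by
        have := hmn_mem; rw [hnz] at this
        simpa using (List.mem_filter.1 this).2
      have hmx_pos : (0 : Int) < mx := by
        have hmns : mn ∈ s := by
          have : mn ∈ nz := hmn_mem
          rw [hnz] at this
          exact hperm.mem_iff.2 (List.mem_of_mem_filter this)
        exact lt_of_lt_of_le hmn_pos (hmx_ge mn hmns)
      have hmx_mem : mx ∈ nz := by
        rw [hnz]
        exact List.mem_filter.2 ⟨hperm.mem_iff.1 hmx_mem_s, by simpa using hmx_pos⟩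
      have hmaxA_mem : t.foldl max x ∈ nz := by
        rw [hxt]
        rcases PySem.List.foldl_max_mem t x with h' | h'
        · rw [h']; exact List.mem_cons_self
        · exact List.mem_cons_of_mem _ h'
      have hmaxA_ge : ∀ y ∈ nz, y ≤ t.foldl max x := by
        intro y hy
        rw [hxt] at hy
        rcases List.mem_cons.1 hy with rfl | hy'
        · exact (PySem.List.le_foldl_max t y).1
        · exact (PySem.List.le_foldl_max t x).2 y hy'
      have hmx_eq : mx = t.foldl max x := by
        refine le_antisymm (hmaxA_ge _ hmx_mem) ?_
        have : t.foldl max x ∈ s := by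
          apply hperm.mem_iff.2
          rw [hnz] at hmaxA_mem
          exact List.mem_of_mem_filter hmaxA_mem
        exact hmx_ge _ this
      simp only [hc, if_false, hmin, hmax, hmt, hget]
      rw [← hmn_eq, ← hmx_eq]
      by_cases hg : (mx < 25 || mn < 10 || 120 < mx || mx - mn < 5) = true
      · simp [hg]
      · simp only [hg]
        -- peak: A's most_common head count = B's longest sorted run
        have hitems : (PySem.Dict.counter b).items ≠ [] := by
          intro h'
          obtain ⟨y, u, hyu⟩ := List.exists_cons_of_ne_nil hbnil
          have hy : y ∈ (PySem.Dict.counter b).keys := by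
            rw [PySem.Dict.keys_counter, hyu, PySem.Set.mem_ofList]
            exact List.mem_cons_self
          rw [show (PySem.Dict.counter b).keys
              = (PySem.Dict.counter b).items.map (·.1) from rfl, h'] at hy
          simp at hy
        have hsortnil : PySem.List.sorted (PySem.Dict.counter b).items (fun q => q.2) true ≠ [] := by
          intro h'
          exact hitems ((PySem.List.sorted_eq_nil_iff _ _ _).1 h')
        obtain ⟨p, prest, hps⟩ := List.exists_cons_of_ne_nil hsortnil
        have hvnil : (PySem.Dict.counter b).values ≠ [] := by
          intro h'
          apply hitems
          have : (PySem.Dict.counter b).items.map (·.2) = [] := h'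
          simpa using this
        obtain ⟨peak, hpk⟩ : ∃ pk, PySem.List.max? (PySem.Dict.counter b).values (fun y => y) = some pk := by
          cases hmo : PySem.List.max? (PySem.Dict.counter b).values (fun y => y) with
          | none => exact absurd ((PySem.List.max?_eq_none_iff _ _).1 hmo) hvnil
          | some pk => exact ⟨pk, rfl⟩
        have hpeq : p.2 = peak := pvPeak_eq _ p prest hps peak hpk
        -- values of the counter are the per-key counts
        have hvalues : (PySem.Dict.counter b).values
            = (PySem.Set.ofList b).map (fun k => (b.count k : Int)) := by
          have : (PySem.Dict.counter b).values = (PySem.Dict.counter b).items.map (·.2) := rfl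
          rw [this, PySem.Dict.items_counter, List.map_map]
          rfl
        -- B's fold peak
        obtain ⟨hprev, hmaxI, hattI, hrunI⟩ := pvRunFold_invariant s hpw
        set st := s.foldl pvRunStep (0, 0, (none : Option Int)) with hst
        have hstA : st.1 = peak := by
          refine le_antisymm ?_ ?_
          · rcases hattI with h' | ⟨v, hv, hcv⟩
            · exact absurd h' hsnil
            · rw [← hcv]
              have hcnt : List.count v s = List.count v b := hperm.count_eq v
              rw [hcnt]
              apply PySem.List.max?_isMax (key := fun y => y) hpk
              rw [hvalues]
              exact List.mem_map_of_mem ((PySem.Set.mem_ofList _ _).2 (hperm.mem_iff.1 hv))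
          · have hpm := PySem.List.max?_mem (key := fun y => y) hpk
            rw [hvalues] at hpm
            obtain ⟨k, hk, hk2⟩ := List.mem_map.1 hpm
            rw [← hk2]
            have : List.count k b = List.count k s := (hperm.count_eq k).symm
            rw [this]
            exact hmaxI k
        rw [hps]
        have hc2 : ¬ ((((mn :: tl).length : Nat) : Int) < 100) := by
          rw [← hmt]; exact hc'
        have hnzl : ((((mn :: tl).length : Nat)) : Int) = (nz.length : Int) := by
          rw [← hmt]; exact_mod_cast hlenf
        simp only [hnzl]
        simp [hpeq, hstA]
        intro h'
        exact absurd (by exact_mod_cast h' : ((nz.length : Int) < 100)) hc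

-- ===== VERDICT (by name: the statement is the Claim_ definition above) =====
theorem score_ign_block_spec : Claim_equal_score_ign_block := by
  intro d addr _
  exact score_ign_block_eq d addr
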